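-- pv_equiv track=rewrite | github.com/Shubham-Choudhury/GeeksforGeeks-Problems | December 2023/Game of XOR/main.py | gameOfXor
-- ===== SOURCE A (Python) =====
-- def gameOfXor(N , A):
--     # code here
--     ans = 0
--     for i, e in enumerate(A):
--         if (i+1)*(N-i)%2 == 0:
--             ans ^= 0
--         else:
--             ans ^= e
--     return ans
-- ===== SOURCE B (Python) =====
-- def gameOfXor(N, A):
--     # (i+1)*(N-i) is odd exactly when N is odd and the index i is even,
--     # so the answer is 0 for even N, else the XOR of the even-index elements.
--     if N % 2 == 0:
--         return 0
--     ans = 0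
--     for e in A[::2]:
--         ans ^= e
--     return ans
-- ===== Notes on version B (the rewrite author's own statement) =====
-- stated objective: simpler
-- what changed: Replaces the per-element parity test of (i+1)*(N-i) by the derived closed-form condition (the weight is odd iff N is odd and the index is even): early-return 0 for even N, otherwise XOR the stride-2 slice A[::2], dropping the per-element multiply/mod entirely.
import Mathlib
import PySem

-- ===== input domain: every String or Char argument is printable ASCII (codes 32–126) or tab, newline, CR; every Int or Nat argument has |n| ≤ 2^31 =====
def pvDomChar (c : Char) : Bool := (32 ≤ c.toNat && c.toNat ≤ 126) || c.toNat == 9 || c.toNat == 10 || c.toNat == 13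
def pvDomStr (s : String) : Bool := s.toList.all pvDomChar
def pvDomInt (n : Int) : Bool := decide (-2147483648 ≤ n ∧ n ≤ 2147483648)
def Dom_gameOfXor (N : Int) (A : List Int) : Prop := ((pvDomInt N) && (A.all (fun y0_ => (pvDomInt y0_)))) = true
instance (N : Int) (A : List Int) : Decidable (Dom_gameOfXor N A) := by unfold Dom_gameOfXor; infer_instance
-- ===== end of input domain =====

-- B replaces the per-element parity test of (i+1)*(N-i) by the derived condition
-- (the weight is odd iff N is odd and i is even): 0 for even N, else XOR of A[::2].

-- ===== PORT A =====
def gameOfXor (N : Int) (A : List Int) : Int :=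
  (PySem.List.enumerate A 0).foldl
    (fun ans p =>
      if PySem.Int.mod ((p.1 + 1) * (N - p.1)) 2 = 0 then PySem.Int.bxor ans 0
      else PySem.Int.bxor ans p.2) 0

-- ===== PORT B =====
def gameOfXor_alt (N : Int) (A : List Int) : Int :=
  if PySem.Int.mod N 2 = 0 then 0
  else ((PySem.List.slice? A none none 2).getD []).foldl PySem.Int.bxor 0

-- ===== PRECONDITION & SPEC =====
def Spec_gameOfXor (N : Int) (A : List Int) (out : Int) : Prop := out = gameOfXor_alt N A
instance (N : Int) (A : List Int) (out : Int) : Decidable (Spec_gameOfXor N A out) := by unfold Spec_gameOfXor; infer_instance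

-- ===== CLAIM (what is proved, stated in full; the proofs are below) =====
def Claim_equal_gameOfXor : Prop := ∀ (N : Int) (A : List Int), Dom_gameOfXor N A → Spec_gameOfXor N A (gameOfXor N A)

-- ===== LEMMAS AND PROOFS =====

-- the even-index elements of a list, two at a time
def evens : List Int → List Int
  | [] => []
  | x :: r => x :: evens (r.drop 1)
  termination_by l => l.length
  decreasing_by simp

theorem evens_nil : evens [] = [] := by unfold evens; rfl

theorem evens_cons (x : Int) (r : List Int) : evens (x :: r) = x :: evens (r.drop 1) := by
  unfold evens; cases List.drop 1 r <;> simp [evens]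

theorem parity_odd (i N : Int) (hi : i % 2 = 0) (hN : N % 2 = 1) :
    ¬ PySem.Int.mod ((i + 1) * (N - i)) 2 = 0 := by
  rw [PySem.Int.mod_eq_emod_of_pos (by omega : (0:Int) < 2), Int.mul_emod]
  have h1 : (i + 1) % 2 = 1 := by omega
  have h2 : (N - i) % 2 = 1 := by omega
  rw [h1, h2]; decide

theorem parity_even (i N : Int) (h : ¬(i % 2 = 0 ∧ N % 2 = 1)) :
    PySem.Int.mod ((i + 1) * (N - i)) 2 = 0 := by
  rw [PySem.Int.mod_eq_emod_of_pos (by omega : (0:Int) < 2), Int.mul_emod]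
  have h1 : (i + 1) % 2 = 0 ∨ (i + 1) % 2 = 1 := by omega
  have h2 : (N - i) % 2 = 0 ∨ (N - i) % 2 = 1 := by omega
  rcases h1 with h1 | h1 <;> rcases h2 with h2 | h2 <;> rw [h1, h2] <;> first | decide | omega

-- A's loop is the identity when N is even
theorem loopA_even (N : Int) (hN : N % 2 = 0) :
    ∀ (A : List Int) (i ans : Int),
      (PySem.List.enumerate A i).foldl
        (fun ans p =>
          if PySem.Int.mod ((p.1 + 1) * (N - p.1)) 2 = 0 then PySem.Int.bxor ans 0
          else PySem.Int.bxor ans p.2) ans = ans := by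
  intro A
  induction A with
  | nil => intro i ans; simp [PySem.List.enumerate_nil]
  | cons x r ih =>
    intro i ans
    rw [PySem.List.enumerate_cons, List.foldl_cons]
    show (PySem.List.enumerate r (i + 1)).foldl _
      (if PySem.Int.mod ((i + 1) * (N - i)) 2 = 0 then PySem.Int.bxor ans 0
       else PySem.Int.bxor ans x) = ans
    rw [if_pos (parity_even i N (by omega)), PySem.Int.bxor_zero]
    exact ih (i + 1) ans

-- for odd N, A's loop XORs the elements at even (resp. odd) positions of the rest
theorem loopA_odd (N : Int) (hN : N % 2 = 1) :
    ∀ (A : List Int) (i ans : Int),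
      (PySem.List.enumerate A i).foldl
        (fun ans p =>
          if PySem.Int.mod ((p.1 + 1) * (N - p.1)) 2 = 0 then PySem.Int.bxor ans 0
          else PySem.Int.bxor ans p.2) ans
      = (if i % 2 = 0 then evens A else evens A.tail).foldl PySem.Int.bxor ans := by
  intro A
  induction A with
  | nil => intro i ans; simp [PySem.List.enumerate_nil, evens_nil]
  | cons x r ih =>
    intro i ans
    rw [PySem.List.enumerate_cons, List.foldl_cons]
    show (PySem.List.enumerate r (i + 1)).foldl _
      (if PySem.Int.mod ((i + 1) * (N - i)) 2 = 0 then PySem.Int.bxor ans 0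
       else PySem.Int.bxor ans x) = _
    by_cases hi : i % 2 = 0
    · rw [if_neg (parity_odd i N hi hN), ih (i + 1) (PySem.Int.bxor ans x),
        if_neg (by omega : ¬ (i + 1) % 2 = 0), if_pos hi,
        evens_cons, List.foldl_cons, List.drop_one]
    · rw [if_pos (parity_even i N (by tauto)), PySem.Int.bxor_zero, ih (i + 1) ans,
        if_pos (by omega : (i + 1) % 2 = 0), if_neg hi, List.tail_cons]

theorem filterMap_range_evens : ∀ (A : List Int),
    List.filterMap (fun k => A[2 * k]?) (List.range ((A.length + 1) / 2)) = evens A := by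
  intro A
  induction A using evens.induct with
  | case1 => simp [evens_nil]
  | case2 x r ih =>
    cases r with
    | nil => simp [evens_cons, evens_nil, List.range_succ]
    | cons y t =>
      rw [evens_cons]
      simp only [List.drop_succ_cons, List.drop_zero] at ih ⊢
      rw [show ((x :: y :: t).length + 1) / 2 = (t.length + 1) / 2 + 1 from by simp; omega,
        List.range_succ_eq_map]
      rw [List.filterMap_cons]
      simp only [Nat.mul_zero, List.getElem?_cons_zero, List.filterMap_map]
      rw [show ((fun k => (x :: y :: t)[2 * k]?) ∘ Nat.succ) = (fun (k : Nat) => t[2 * k]?) from by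
        funext k
        simp only [Function.comp_apply]
        rw [show 2 * (Nat.succ k) = (2 * k + 1) + 1 from by omega]
        simp [List.getElem?_cons_succ]]
      rw [ih]

-- the stride-2 slice A[::2] is exactly the even-index elements
theorem slice2_eq_evens : ∀ (A : List Int),
    PySem.List.slice? A none none 2 = some (evens A) := by
  intro A
  unfold PySem.List.slice? PySem.List.sliceIndices
  simp
  rw [show (if 0 < A.length then (((A.length : Int) + 2 - 1) / 2).toNat else 0)
        = (A.length + 1) / 2 from by split <;> omega]
  rw [show (fun (k : Nat) => A[(2 * (k : Int)).toNat]?) = (fun k => A[2 * k]?) from by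
    funext k
    have h : ((2 * (k : Int)).toNat) = 2 * k := by omega
    rw [h]]
  exact filterMap_range_evens A

-- ===== VERDICT (by name: the statement is the Claim_ definition above) =====
theorem gameOfXor_spec : Claim_equal_gameOfXor := by
  intro N A _
  show gameOfXor N A = gameOfXor_alt N A
  unfold gameOfXor gameOfXor_alt
  rw [slice2_eq_evens]
  by_cases hN : PySem.Int.mod N 2 = 0
  · rw [if_pos hN]
    exact loopA_even N
      (by rwa [PySem.Int.mod_eq_emod_of_pos (by omega : (0:Int) < 2)] at hN) A 0 0
  · rw [if_neg hN]
    have hN' : N % 2 = 1 := by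
      rw [PySem.Int.mod_eq_emod_of_pos (by omega : (0:Int) < 2)] at hN; omega
    rw [loopA_odd N hN' A 0 0]
    simp
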